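-- pv_equiv track=rewrite | github.com/TahaValiji/ValTaha-FirstRepo | unoGame.py | firstCard
-- ===== SOURCE A (Python) =====
-- def firstCard(deck: list):
--     """
--     Pops the first card from the deck and checks if it is a special card.
--     If it is, it is put back in the deck and the process is repeated until
--     a non-special card is drawn.
--
--     Args:
--         deck (list): The list of cards in the deck.
--
--     Returns:
--         tuple: A tuple containing the first card drawn from the deck and the updated deck.
--     """
--     while True:
--         FirstCard = deck.pop(0)
--         notAllowedCards = ["Draw Two", "Reverse", "Skip", "Wild"]
--         for i in notAllowedCards:
--             if i in FirstCard:
--                 deck.append(FirstCard)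
--                 break
--         else:
--             break
--     return FirstCard, deck
-- ===== SOURCE B (Python) =====
-- def firstCard(deck: list):
--     special = ("Draw Two", "Reverse", "Skip", "Wild")
--     k = next(i for i, c in enumerate(deck) if not any(s in c for s in special))
--     card = deck[k]
--     deck[:] = deck[k + 1:] + deck[:k]
--     return card, deck
-- ===== Notes on version B (the rewrite author's own statement) =====
-- stated objective: alternative
-- what changed: Instead of repeatedly popping the front and appending specials to the back, B finds the first non-special index k in one pass and rebuilds the deck as deck[k+1:]+deck[:k].
-- outside the precondition, e.g. on firstCard(['Skip Red', 'Wild']): A does not finish within the time limit, B raises StopIteration; on firstCard([]): A raises IndexError, B raises StopIteration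
import Mathlib
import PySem

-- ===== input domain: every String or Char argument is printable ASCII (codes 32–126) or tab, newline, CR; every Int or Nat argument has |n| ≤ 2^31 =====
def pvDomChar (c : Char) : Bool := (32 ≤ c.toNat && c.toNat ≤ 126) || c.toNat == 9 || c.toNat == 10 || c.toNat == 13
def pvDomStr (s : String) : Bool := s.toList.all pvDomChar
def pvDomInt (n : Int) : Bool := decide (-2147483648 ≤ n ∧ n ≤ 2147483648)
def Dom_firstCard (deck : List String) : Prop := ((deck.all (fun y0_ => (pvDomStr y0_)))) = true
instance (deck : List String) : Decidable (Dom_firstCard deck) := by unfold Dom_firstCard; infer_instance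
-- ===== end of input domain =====

-- B replaces A's pop-and-requeue loop by a single scan for the first non-special index k,
-- returning (deck[k], deck[k+1:]+deck[:k]). A mutates the deck in place; the equivalence
-- proved here is about the RETURN value (B performs the same in-place update).

-- ===== PORT A =====
-- "i in FirstCard" for each of the four special substrings, with break = List.any
def pvSpecial (c : String) : Bool :=
  (["Draw Two", "Reverse", "Skip", "Wild"] : List String).any (fun i => PySem.Str.isIn i c)

-- A's while-True loop: pop(0); if special, append and repeat. Fueled by deck.length,
-- enough iterations whenever a non-special card exists (Pre_); ("", []) on exhaustion.
def pvLoopA : Nat → List String → String × List String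
  | 0, d => ("", d)
  | _ + 1, [] => ("", [])          -- deck.pop(0) raises IndexError here (outside Pre_)
  | n + 1, c :: rest => if pvSpecial c then pvLoopA n (rest ++ [c]) else (c, rest)

def firstCard (deck : List String) : String × List String :=
  pvLoopA deck.length deck

-- ===== PORT B =====
-- next(i for i, c in enumerate(deck) if not any(s in c for s in special))
def pvFindK : List String → Option Nat
  | [] => none                      -- next(...) raises StopIteration (outside Pre_)
  | c :: rest => if pvSpecial c then (pvFindK rest).map (· + 1) else some 0

def firstCard_alt (deck : List String) : String × List String :=
  match pvFindK deck with
  | none => ("", [])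
  | some k => (deck.getD k "", deck.drop (k + 1) ++ deck.take k)  -- deck[k], deck[k+1:]+deck[:k] (k ≥ 0)

-- ===== PRECONDITION & SPEC =====
-- Pre_ excludes the empty deck (A raises IndexError) and decks whose cards are all special
-- (A's while-loop never terminates); B raises StopIteration on both.
def Pre_firstCard (deck : List String) : Prop := ∃ c ∈ deck, pvSpecial c = false
instance (deck : List String) : Decidable (Pre_firstCard deck) := by unfold Pre_firstCard; infer_instance
def pvWitness_firstCard : List String := ["Skip Blue", "Red 5", "Wild"]

def Spec_firstCard (deck : List String) (out : String × List String) : Prop := out = firstCard_alt deck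
instance (deck : List String) (out : String × List String) : Decidable (Spec_firstCard deck out) := by unfold Spec_firstCard; infer_instance

-- ===== CLAIM (what is proved, stated in full; the proofs are below) =====
def Claim_equal_firstCard : Prop := ∀ (deck : List String), Dom_firstCard deck → Pre_firstCard deck → Spec_firstCard deck (firstCard deck)

-- ===== LEMMAS AND PROOFS =====

theorem pvFindK_lt_length {d : List String} {k : Nat} (h : pvFindK d = some k) :
    k < d.length := by
  induction d generalizing k with
  | nil => simp [pvFindK] at h
  | cons c rest ih =>
    simp only [pvFindK] at h
    split at h
    · rcases Option.map_eq_some_iff.mp h with ⟨k', hk', rfl⟩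
      have := ih hk'; simp; omega
    · cases h; simp

theorem pvFindK_append {d : List String} {k : Nat} (ys : List String)
    (h : pvFindK d = some k) : pvFindK (d ++ ys) = some k := by
  induction d generalizing k with
  | nil => simp [pvFindK] at h
  | cons c rest ih =>
    simp only [pvFindK, List.cons_append] at h ⊢
    by_cases hc : pvSpecial c
    · rw [if_pos hc] at h ⊢
      rcases Option.map_eq_some_iff.mp h with ⟨k', hk', rfl⟩
      simp [ih hk']
    · rw [if_neg hc] at h ⊢
      exact h

theorem pvFindK_isSome_of_pre {d : List String} (h : ∃ c ∈ d, pvSpecial c = false) :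
    ∃ k, pvFindK d = some k := by
  induction d with
  | nil => simp at h
  | cons c rest ih =>
    by_cases hc : pvSpecial c
    · rcases h with ⟨x, hx, hxs⟩
      rcases List.mem_cons.mp hx with rfl | hx'
      · simp [hc] at hxs
      · rcases ih ⟨x, hx', hxs⟩ with ⟨k, hk⟩
        exact ⟨k + 1, by simp [pvFindK, hc, hk]⟩
    · exact ⟨0, by simp [pvFindK, hc]⟩

theorem pvLoopA_eq {n : Nat} : ∀ {d : List String} {k : Nat},
    pvFindK d = some k → k < n →
    pvLoopA n d = (d.getD k "", d.drop (k + 1) ++ d.take k) := by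
  induction n with
  | zero => intro d k _ hk; omega
  | succ n ih =>
    intro d k hfind hk
    cases d with
    | nil => simp [pvFindK] at hfind
    | cons c rest =>
      simp only [pvFindK] at hfind
      by_cases hc : pvSpecial c
      · rw [if_pos hc] at hfind
        rcases Option.map_eq_some_iff.mp hfind with ⟨k', hk', rfl⟩
        have hlen := pvFindK_lt_length hk'
        have hstep : pvLoopA (n + 1) (c :: rest) = pvLoopA n (rest ++ [c]) := by
          simp [pvLoopA, hc]
        rw [hstep, ih (pvFindK_append [c] hk') (by omega)]
        simp only [Prod.mk.injEq]
        refine ⟨?_, ?_⟩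
        · simp [List.getD, List.getElem?_append_left hlen]
        · rw [List.drop_append_of_le_length (by omega),
              List.take_append_of_le_length (by omega)]
          simp [List.drop_succ_cons, List.take_succ_cons]
      · rw [if_neg hc] at hfind
        cases hfind
        simp [pvLoopA, hc]

-- ===== VERDICT (by name: the statement is the Claim_ definition above) =====
theorem firstCard_spec : Claim_equal_firstCard := by
  intro deck _ hpre
  rcases pvFindK_isSome_of_pre hpre with ⟨k, hk⟩
  unfold Spec_firstCard firstCard firstCard_alt
  rw [hk, pvLoopA_eq hk (pvFindK_lt_length hk)]
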